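-- pv_equiv track=rewrite | github.com/pipidog/DFTtoolbox | DFTtoolbox/qe.py | _kdiv_qe
-- ===== SOURCE A (Python) =====
-- def _kdiv_qe(kdiv):
--     # convert kdiv from QE format to postprocess format
--     if kdiv=='defaut':
--         kdiv_eq='default'
--     else:
--         kdiv_qe=[0]
--         [kdiv_qe.append(val+kdiv_qe[n]) for n, val in enumerate(kdiv)]
--         kdiv_qe.pop(-1)
--
--     return kdiv_qe
-- ===== SOURCE B (Python) =====
-- def _kdiv_qe(kdiv):
--     # convert kdiv from QE format to postprocess format
--     if kdiv=='defaut':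
--         kdiv_eq='default'
--     else:
--         kdiv_qe=[sum(kdiv[:i]) for i in range(len(kdiv))]
--     return kdiv_qe
-- ===== Notes on version B (the rewrite author's own statement) =====
-- stated objective: simpler
-- what changed: Replaces A's side-effecting append/pop cumulative loop (which indexes back into the list being built) with a direct comprehension computing each exclusive prefix sum as sum(kdiv[:i]).
import Mathlib
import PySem

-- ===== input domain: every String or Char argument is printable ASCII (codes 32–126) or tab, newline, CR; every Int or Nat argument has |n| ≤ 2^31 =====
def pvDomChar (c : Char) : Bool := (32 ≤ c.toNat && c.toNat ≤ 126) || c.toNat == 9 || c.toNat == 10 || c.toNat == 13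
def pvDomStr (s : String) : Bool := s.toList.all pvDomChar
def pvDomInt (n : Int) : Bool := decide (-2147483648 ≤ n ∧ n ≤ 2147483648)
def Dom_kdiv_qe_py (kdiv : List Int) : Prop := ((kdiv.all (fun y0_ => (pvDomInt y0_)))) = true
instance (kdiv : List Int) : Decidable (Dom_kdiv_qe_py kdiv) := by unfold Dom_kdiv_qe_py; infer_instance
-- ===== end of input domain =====

-- B replaces A's side-effecting append/pop cumulative loop with a direct
-- comprehension computing each exclusive prefix sum as sum(kdiv[:i]) (simpler).
-- For a List Int argument the Python 'kdiv == "defaut"' test is always False,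
-- so only the else branch is ported.

-- ===== PORT A =====
-- the comprehension '[kdiv_qe.append(val+kdiv_qe[n]) for n, val in enumerate(kdiv)]'
-- runs for its append side effect; ported as a recursion carrying (acc, n) over kdiv
def kdivLoopA (acc : List Int) (n : Nat) : List Int → List Int
  | [] => acc
  | v :: rest => kdivLoopA (acc ++ [v + (PySem.List.pyGet? acc (n : Int)).getD 0]) (n + 1) rest

def kdiv_qe_py (kdiv : List Int) : List Int :=
  -- kdiv_qe = [0]; the loop; kdiv_qe.pop(-1)
  (kdivLoopA [0] 0 kdiv).dropLast

-- ===== PORT B =====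
def kdiv_qe_py_alt (kdiv : List Int) : List Int :=
  -- [sum(kdiv[:i]) for i in range(len(kdiv))]
  (List.range kdiv.length).map (fun (i : Nat) => ((PySem.List.slice kdiv none (some (i : Int))).sum))

-- ===== PRECONDITION & SPEC =====
def Spec_kdiv_qe_py (kdiv : List Int) (out : List Int) : Prop := out = kdiv_qe_py_alt kdiv
instance (kdiv : List Int) (out : List Int) : Decidable (Spec_kdiv_qe_py kdiv out) := by unfold Spec_kdiv_qe_py; infer_instance

-- ===== CLAIM (what is proved, stated in full; the proofs are below) =====
def Claim_equal_kdiv_qe_py : Prop := ∀ (kdiv : List Int), Dom_kdiv_qe_py kdiv → Spec_kdiv_qe_py kdiv (kdiv_qe_py kdiv)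

-- ===== LEMMAS AND PROOFS =====

/-- running sums after seed `s`: `prefixTail s [v1,v2,…] = [s+v1, s+v1+v2, …]` -/
def prefixTail (s : Int) : List Int → List Int
  | [] => []
  | v :: rest => (s + v) :: prefixTail (s + v) rest

theorem kdivLoopA_eq (rest : List Int) : ∀ (acc : List Int) (n : Nat),
    acc.length = n + 1 → kdivLoopA acc n rest = acc ++ prefixTail (acc.getLastD 0) rest := by
  induction rest with
  | nil => intro acc n h; simp [kdivLoopA, prefixTail]
  | cons v r ih =>
    intro acc n h
    have hn : n < acc.length := by omega
    have hget : (PySem.List.pyGet? acc (n : Int)).getD 0 = acc.getLastD 0 := by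
      have hn1 : n = acc.length - 1 := by omega
      rw [PySem.List.pyGet?_natCast, hn1, ← List.getLast?_eq_getElem?,
        List.getLastD_eq_getLast?]
    simp only [kdivLoopA, hget]
    rw [ih (acc ++ [v + acc.getLastD 0]) (n + 1) (by simp [h])]
    simp [prefixTail, List.append_assoc]
    constructor
    · ring
    · rw [add_comm]

theorem cons_prefixTail (l : List Int) : ∀ (s : Int),
    s :: prefixTail s l = (List.range (l.length + 1)).map (fun i => s + (l.take i).sum) := by
  induction l with
  | nil => intro s; simp [prefixTail]
  | cons v r ih =>
    intro s
    rw [List.range_succ_eq_map]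
    simp only [prefixTail, List.length_cons, List.map_cons, List.take_zero, List.sum_nil,
      add_zero, List.map_map]
    congr 1
    rw [ih (s + v)]
    congr 1
    funext i
    simp [List.take_succ_cons, add_assoc]

-- ===== VERDICT (by name: the statement is the Claim_ definition above) =====
theorem kdiv_qe_py_spec : Claim_equal_kdiv_qe_py := by
  intro kdiv _
  unfold Spec_kdiv_qe_py kdiv_qe_py kdiv_qe_py_alt
  have hB : (List.range kdiv.length).map
        (fun (i : Nat) => ((PySem.List.slice kdiv none (some (i : Int))).sum))
      = (List.range kdiv.length).map (fun i => (kdiv.take i).sum) := by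
    apply List.map_congr_left
    intro i hi
    rw [List.mem_range] at hi
    rw [PySem.List.slice_to]
    · simp
    · omega
  rw [hB, kdivLoopA_eq kdiv [0] 0 rfl]
  have hg : (([0] : List Int).getLastD 0) = 0 := rfl
  rw [hg]
  have h := cons_prefixTail kdiv 0
  simp only [zero_add] at h
  rw [List.singleton_append, h, List.range_succ, List.map_append, List.map_cons,
    List.map_nil, List.dropLast_concat]
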